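-- pv_equiv track=rewrite | github.com/PlaviAjvar/AdventOfCode2019 | day_4.py | exists_pair
-- ===== SOURCE A (Python) =====
-- def exists_pair(n):
--     cur_dig = 10
--     rep_count = 1
--     while n > 0:
--         rem = n % 10
--         if cur_dig == rem:
--             rep_count += 1
--         else:
--             if rep_count == 2:
--                 return True
--             rep_count = 1
--             cur_dig = rem
--         n //= 10
--     if rep_count == 2:
--         return True
--     return False
-- ===== SOURCE B (Python) =====
-- def exists_pair(n):
--     d = []
--     while n > 0:
--         d.append(n % 10)
--         n //= 10
--     ext = [None] + d + [None]
--     return any(x == y and p != x and q != x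
--                for p, x, y, q in zip(ext, ext[1:], ext[2:], ext[3:]))
-- ===== Notes on version B (the rewrite author's own statement) =====
-- stated objective: alternative
-- what changed: B extracts the digit list, pads it with None sentinels, and detects an isolated pair by a stateless sliding-window test (x==y and both neighbours differ) over zipped shifted copies, instead of A's streaming run-length counter with early returns.
import Mathlib
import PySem

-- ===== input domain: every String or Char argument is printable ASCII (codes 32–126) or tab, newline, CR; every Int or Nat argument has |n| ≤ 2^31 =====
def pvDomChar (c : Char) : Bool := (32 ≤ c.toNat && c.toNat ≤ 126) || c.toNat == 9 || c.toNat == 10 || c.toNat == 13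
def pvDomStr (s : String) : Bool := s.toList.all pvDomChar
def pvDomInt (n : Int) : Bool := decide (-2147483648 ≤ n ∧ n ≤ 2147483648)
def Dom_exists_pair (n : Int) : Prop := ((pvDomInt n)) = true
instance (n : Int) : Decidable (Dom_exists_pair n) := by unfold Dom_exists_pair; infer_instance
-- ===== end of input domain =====

-- B detects an exactly-two digit run by a stateless sliding-window test over the
-- None-padded digit list (zip of shifted copies) instead of A's run-length counter (objective: alternative).

-- termination helper (cited by the ports' decreasing_by)
theorem pv_toNat_div10_lt (n : Int) (h : 0 < n) : (PySem.Int.floordiv n 10).toNat < n.toNat := by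
  rw [PySem.Int.floordiv_eq_ediv_of_pos (by norm_num)]
  omega

-- ===== PORT A =====
-- the while loop of A: state (cur_dig, rep_count), early `return True` inside
def exists_pair_loop (n cur cnt : Int) : Bool :=
  if 0 < n then
    let rem := PySem.Int.mod n 10
    if cur == rem then
      exists_pair_loop (PySem.Int.floordiv n 10) cur (cnt + 1)
    else if cnt == 2 then
      true
    else
      exists_pair_loop (PySem.Int.floordiv n 10) rem 1
  else
    cnt == 2
termination_by n.toNat
decreasing_by all_goals exact pv_toNat_div10_lt n (by assumption)

def exists_pair (n : Int) : Bool := exists_pair_loop n 10 1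

-- ===== PORT B =====
-- B's while loop: d.append(n % 10); n //= 10
def exists_pair_collect (n : Int) (acc : List Int) : List Int :=
  if 0 < n then
    exists_pair_collect (PySem.Int.floordiv n 10) (acc ++ [PySem.Int.mod n 10])
  else
    acc
termination_by n.toNat
decreasing_by exact pv_toNat_div10_lt n (by assumption)

-- ext = [None] + d + [None] mixes None and ints -> List (Option Int);
-- zip(ext, ext[1:], ext[2:], ext[3:]) is ported as nested List.zip (both truncate to the shortest)
def exists_pair_alt (n : Int) : Bool :=
  let d := exists_pair_collect n []
  let ext : List (Option Int) := [none] ++ d.map some ++ [none]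
  ((ext.zip (ext.drop 1)).zip ((ext.drop 2).zip (ext.drop 3))).any
    (fun pq => (pq.1.2 == pq.2.1) && !(pq.1.1 == pq.1.2) && !(pq.2.2 == pq.1.2))

-- ===== PRECONDITION & SPEC =====
def Spec_exists_pair (n : Int) (out : Bool) : Prop := out = exists_pair_alt n
instance (n : Int) (out : Bool) : Decidable (Spec_exists_pair n out) := by unfold Spec_exists_pair; infer_instance

-- ===== CLAIM (what is proved, stated in full; the proofs are below) =====
def Claim_equal_exists_pair : Prop := ∀ (n : Int), Dom_exists_pair n → Spec_exists_pair n (exists_pair n)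

-- ===== LEMMAS AND PROOFS =====

-- the digit list of n, least significant first
def pvDl (n : Int) : List Int :=
  if 0 < n then PySem.Int.mod n 10 :: pvDl (PySem.Int.floordiv n 10) else []
termination_by n.toNat
decreasing_by exact pv_toNat_div10_lt n (by assumption)

-- A's loop re-expressed over the digit list
def pvLoopL : List Int → Int → Int → Bool
  | [], _, cnt => cnt == 2
  | d :: ds, cur, cnt =>
    if cur == d then pvLoopL ds cur (cnt + 1)
    else if cnt == 2 then true
    else pvLoopL ds d 1

-- B's zip-of-shifted-copies `any`, as a function of ext
def pvZ (ext : List (Option Int)) : Bool :=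
  ((ext.zip (ext.drop 1)).zip ((ext.drop 2).zip (ext.drop 3))).any
    (fun pq => (pq.1.2 == pq.2.1) && !(pq.1.1 == pq.1.2) && !(pq.2.2 == pq.1.2))

-- B's sliding window re-expressed structurally
def pvS : List (Option Int) → Bool
  | p :: x :: y :: q :: t => ((x == y) && !(p == x) && !(q == x)) || pvS (x :: y :: q :: t)
  | _ => false

-- common reference: "some maximal run has length exactly 2", by run decomposition
def pvG : List Int → Bool
  | [] => false
  | a :: l => ((l.takeWhile (· == a)).length + 1 == 2) || pvG (l.dropWhile (· == a))
termination_by l => l.length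
decreasing_by simp only [List.length_cons]; exact Nat.lt_succ_of_le (List.length_dropWhile_le _ _)

theorem pv_collect_eq (n : Int) (acc : List Int) :
    exists_pair_collect n acc = acc ++ pvDl n := by
  induction n, acc using exists_pair_collect.induct with
  | case1 n acc h ih =>
    rw [exists_pair_collect, if_pos h, ih]
    conv_rhs => rw [pvDl, if_pos h]
    simp
  | case2 n acc h =>
    rw [exists_pair_collect, if_neg h, pvDl, if_neg h]
    simp

theorem pv_loopA_eq (n cur cnt : Int) :
    exists_pair_loop n cur cnt = pvLoopL (pvDl n) cur cnt := by
  induction n, cur, cnt using exists_pair_loop.induct with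
  | case1 n cur cnt h rem heq ih =>
    have heq' : (cur == PySem.Int.mod n 10) = true := heq
    rw [exists_pair_loop, if_pos h]
    conv_rhs => rw [pvDl, if_pos h]
    simp only [pvLoopL, heq', if_pos]
    exact ih
  | case2 n cur cnt h rem hne hcnt =>
    have hne' : (cur == PySem.Int.mod n 10) = false := by
      cases hx : (cur == PySem.Int.mod n 10)
      · rfl
      · exact absurd hx hne
    rw [exists_pair_loop, if_pos h]
    conv_rhs => rw [pvDl, if_pos h]
    simp only [pvLoopL, hne', Bool.false_eq_true, if_false, hcnt, if_true]
  | case3 n cur cnt h rem hne hcnt ih =>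
    have hne' : (cur == PySem.Int.mod n 10) = false := by
      cases hx : (cur == PySem.Int.mod n 10)
      · rfl
      · exact absurd hx hne
    rw [exists_pair_loop, if_pos h]
    conv_rhs => rw [pvDl, if_pos h]
    simp only [pvLoopL, hne', Bool.false_eq_true, if_false, hcnt]
    exact ih
  | case4 n cur cnt h =>
    rw [exists_pair_loop, if_neg h, pvDl, if_neg h]
    rfl

theorem pvZ_cons4 (p x y q : Option Int) (t : List (Option Int)) :
    pvZ (p :: x :: y :: q :: t)
      = (((x == y) && !(p == x) && !(q == x)) || pvZ (x :: y :: q :: t)) := rfl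

-- the zip-of-shifted-copies `any` is the structural slide pvS
theorem pv_zip_any_eq (ext : List (Option Int)) : pvZ ext = pvS ext := by
  induction ext using pvS.induct with
  | case1 p x y q t ih =>
    rw [pvZ_cons4, ih]
    rfl
  | case2 l h =>
    match l, h with
    | [], _ => rfl
    | [_], _ => rfl
    | [_, _], _ => rfl
    | [_, _, _], _ => rfl
    | _ :: _ :: _ :: _ :: _, h => exact absurd rfl (h _ _ _ _ _)

theorem pvS_cons4 (p x y q : Option Int) (t : List (Option Int)) :
    pvS (p :: x :: y :: q :: t)
      = (((x == y) && !(p == x) && !(q == x)) || pvS (x :: y :: q :: t)) := rfl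

theorem pvS_three (p x y : Option Int) : pvS [p, x, y] = false := rfl

-- A's loop absorbs a leading run into the counter
theorem pv_loopA_run (j : Nat) (a : Int) (rest : List Int) (cnt : Int) :
    pvLoopL (List.replicate j a ++ rest) a cnt = pvLoopL rest a (cnt + j) := by
  induction j generalizing cnt with
  | zero => simp
  | succ j ih =>
    simp only [List.replicate_succ, List.cons_append, pvLoopL, BEq.rfl, if_true]
    rw [ih]
    congr 1
    push_cast
    ring

-- takeWhile (· == a) is a replicate of a's
theorem pv_takeWhile_replicate (a : Int) (l : List Int) :
    l.takeWhile (· == a) = List.replicate (l.takeWhile (· == a)).length a := by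
  apply List.eq_replicate_of_mem
  intro b hb
  have hba := List.mem_takeWhile_imp hb
  simp only [beq_iff_eq] at hba
  exact hba

theorem pv_head_dropWhile_ne (a : Int) (l : List Int) (h t : _)
    (hd : l.dropWhile (· == a) = h :: t) : a ≠ h := by
  have := List.head?_dropWhile_not (· == a) l
  rw [hd] at this
  simp only [List.head?_cons] at this
  intro he
  exact absurd (by simp [he] : (h == a) = true) (by simpa using this)

-- a nonempty list is uniquely a maximal leading run ++ remainder with a different head
theorem pv_decomp (a : Int) (l : List Int) :
    ∃ j rest, l = List.replicate j a ++ rest ∧ (∀ h t, rest = h :: t → a ≠ h) ∧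
      rest.length ≤ l.length := by
  refine ⟨(l.takeWhile (· == a)).length, l.dropWhile (· == a), ?_, ?_, List.length_dropWhile_le _ _⟩
  · conv_lhs => rw [← List.takeWhile_append_dropWhile (p := (· == a)) (l := l)]
    congr 1
    exact pv_takeWhile_replicate a l
  · exact pv_head_dropWhile_ne a l

theorem pv_takeWhile_rep (j : Nat) (a : Int) (rest : List Int)
    (h : ∀ h' t, rest = h' :: t → a ≠ h') :
    (List.replicate j a ++ rest).takeWhile (· == a) = List.replicate j a := by
  induction j with
  | zero =>
    cases rest with
    | nil => simp
    | cons b t =>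
      have hba : (b == a) = false := beq_eq_false_iff_ne.mpr (Ne.symm (h b t rfl))
      simp only [List.replicate, List.nil_append]
      rw [List.takeWhile_cons_of_neg (by simp [hba])]
  | succ j ih =>
    simp [List.replicate_succ, ih]

theorem pv_dropWhile_rep (j : Nat) (a : Int) (rest : List Int)
    (h : ∀ h' t, rest = h' :: t → a ≠ h') :
    (List.replicate j a ++ rest).dropWhile (· == a) = rest := by
  induction j with
  | zero =>
    cases rest with
    | nil => simp
    | cons b t =>
      have hba : (b == a) = false := beq_eq_false_iff_ne.mpr (Ne.symm (h b t rfl))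
      simp only [List.replicate, List.nil_append]
      rw [List.dropWhile_cons_of_neg (by simp [hba])]
  | succ j ih =>
    simp [List.replicate_succ, ih]

-- pvG on the decomposed form
theorem pv_G_run (j : Nat) (a : Int) (rest : List Int)
    (h : ∀ h' t, rest = h' :: t → a ≠ h') :
    pvG (a :: (List.replicate j a ++ rest)) = ((j + 1 == 2) || pvG rest) := by
  rw [pvG, pv_takeWhile_rep j a rest h, pv_dropWhile_rep j a rest h, List.length_replicate]

-- A's loop (fresh counter, previous digit differs from the head) computes pvG
theorem pv_loopA_G : ∀ N ds cur, ds.length ≤ N →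
    (∀ h t, ds = h :: t → cur ≠ h) → pvLoopL ds cur 1 = pvG ds := by
  intro N
  induction N with
  | zero =>
    intro ds cur hlen _
    have : ds = [] := List.eq_nil_of_length_eq_zero (Nat.le_zero.mp hlen)
    subst this
    simp [pvLoopL, pvG]
  | succ N ih =>
    intro ds cur hlen hcur
    match ds, hcur, hlen with
    | [], _, _ => simp [pvLoopL, pvG]
    | a :: l, hcur, hlen =>
      have hca : (cur == a) = false := by
        simpa using hcur a l rfl
      obtain ⟨j, rest, hl, hhead, hlr⟩ := pv_decomp a l
      subst hl
      have hreslen : rest.length ≤ N := by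
        simp only [List.length_cons, List.length_append, List.length_replicate] at hlen hlr
        omega
      have h1 : pvLoopL (a :: (List.replicate j a ++ rest)) cur 1 = pvLoopL rest a (1 + j) := by
        simp only [pvLoopL, hca, Bool.false_eq_true, if_false,
          (by decide : ((1 : Int) == 2) = false)]
        exact pv_loopA_run j a rest 1
      rw [h1, pv_G_run j a rest hhead]
      cases rest with
      | nil =>
        by_cases hj : j = 1
        · subst hj; simp [pvLoopL, pvG]
        · have h1f : ((1 + (j : Int)) == 2) = false := by
            simp only [beq_eq_false_iff_ne, ne_eq]; omega
          have h2f : ((j + 1 : Nat) == 2) = false := by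
            simp only [beq_eq_false_iff_ne, ne_eq]; omega
          simp [pvLoopL, pvG, h1f, h2f]
      | cons b t =>
        have hab : (a == b) = false := by
          simpa using hhead b t rfl
        have ht : pvLoopL t b 1 = pvG (b :: t) := by
          have hibt := ih (b :: t) a hreslen (by intro h' t' he; cases he; simpa using hab)
          simpa [pvLoopL, hab, (by decide : ((1 : Int) == 2) = false)] using hibt
        by_cases hj : j = 1
        · subst hj; simp [pvLoopL, hab]
        · have h1f : ((1 + (j : Int)) == 2) = false := by
            simp only [beq_eq_false_iff_ne, ne_eq]; omega
          have h2f : ((j + 1 : Nat) == 2) = false := by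
            simp only [beq_eq_false_iff_ne, ne_eq]; omega
          simp [pvLoopL, hab, h1f, h2f, ht]

-- the slide is blind while the previous element repeats
theorem pv_S_run (j : Nat) (a : Int) (rest : List Int) :
    pvS (some a :: (List.replicate j a ++ rest).map some ++ [none])
      = pvS (some a :: rest.map some ++ [none]) := by
  induction j with
  | zero => rfl
  | succ j ih =>
    rw [← ih]
    cases j with
    | zero =>
      cases rest with
      | nil => rfl
      | cons b t =>
        cases t with
        | nil =>
          simp only [List.replicate, List.map_cons, List.cons_append, List.nil_append,
            List.map_nil, pvS_cons4, pvS_three, BEq.rfl, Bool.not_true, Bool.and_false,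
            Bool.false_and, Bool.false_or]
        | cons c t' =>
          simp only [List.replicate, List.map_cons, List.cons_append, List.nil_append,
            pvS_cons4, BEq.rfl, Bool.not_true, Bool.and_false, Bool.false_and, Bool.false_or]
    | succ j' =>
      rcases hq : (List.replicate j' a ++ rest).map (some (α := Int)) ++ [none] with _ | ⟨h1, t1⟩
      · exact absurd hq (by simp)
      · simp only [List.replicate_succ, List.map_cons, List.cons_append]
        rw [hq, pvS_cons4]
        simp

-- the sliding window (previous element differs from the head) computes pvG
theorem pv_S_G : ∀ N ds (w : Option Int), ds.length ≤ N →
    (∀ h t, ds = h :: t → w ≠ some h) → pvS (w :: ds.map some ++ [none]) = pvG ds := by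
  intro N
  induction N with
  | zero =>
    intro ds w hlen _
    have : ds = [] := List.eq_nil_of_length_eq_zero (Nat.le_zero.mp hlen)
    subst this
    simp [pvS, pvG]
  | succ N ih =>
    intro ds w hlen hw
    match ds, hw, hlen with
    | [], _, _ => simp [pvS, pvG]
    | a :: l, hw, hlen =>
      have hwa : (w == some a) = false := by
        simpa using hw a l rfl
      obtain ⟨j, rest, hl, hhead, hlr⟩ := pv_decomp a l
      subst hl
      have hreslen : rest.length ≤ N := by
        simp only [List.length_cons, List.length_append, List.length_replicate] at hlen hlr
        omega
      have hihrest : pvS (some a :: rest.map some ++ [none]) = pvG rest := by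
        apply ih rest (some a) hreslen
        intro h' t' he
        simpa using hhead h' t' he
      rw [pv_G_run j a rest hhead]
      cases j with
      | zero =>
        -- the head run has length 1: the first window fails on x == y, then slide once
        rw [(by decide : ((0 + 1 : Nat) == 2) = false), Bool.false_or, ← hihrest]
        simp only [List.replicate_zero, List.nil_append, List.map_cons]
        cases rest with
        | nil => rfl
        | cons b t =>
          have hab : ((some a : Option Int) == some b) = false := by
            simpa using hhead b t rfl
          cases t with
          | nil =>
            simp only [List.map_cons, List.map_nil, List.cons_append, List.nil_append,
              pvS_cons4, hab, Bool.false_and, Bool.false_or]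
          | cons c t' =>
            simp only [List.map_cons, List.cons_append, pvS_cons4, hab,
              Bool.false_and, Bool.false_or]
      | succ j' =>
        cases j' with
        | zero =>
          -- run of length exactly 2: the window (w, a, a, next) fires, next ≠ a
          rw [(by decide : ((0 + 1 + 1 : Nat) == 2) = true), Bool.true_or]
          simp only [List.replicate_succ, List.replicate_zero, List.nil_append,
            List.map_cons, List.cons_append]
          cases rest with
          | nil =>
            simp only [List.map_nil, List.nil_append, pvS_cons4, BEq.rfl, Bool.true_and, hwa]
            simp
          | cons b t =>
            have hba : ((some b : Option Int) == some a) = false := by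
              simpa using (Ne.symm (hhead b t rfl))
            simp only [List.map_cons, List.cons_append, pvS_cons4, BEq.rfl, Bool.true_and,
              hwa, hba]
            simp
        | succ j'' =>
          -- run of length ≥ 3: the first window fails on q == x, then slide through the run
          have hfalse : ((j'' + 1 + 1 + 1 : Nat) == 2) = false := by
            simp only [beq_eq_false_iff_ne, ne_eq]
            omega
          rw [hfalse, Bool.false_or]
          have hwin :
              pvS (w :: List.map some (a :: (List.replicate (j'' + 1 + 1) a ++ rest)) ++ [none])
                = pvS (some a :: List.map some (List.replicate (j'' + 1 + 1) a ++ rest) ++ [none]) := by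
            simp only [List.map_cons, List.cons_append, List.replicate_succ]
            rw [pvS_cons4]
            simp
          rw [hwin, pv_S_run (j'' + 1 + 1) a rest, hihrest]

theorem pv_head_pvDl_ne_ten (n : Int) (h t : _) (hd : pvDl n = h :: t) : (10 : Int) ≠ h := by
  by_cases hn : 0 < n
  · rw [pvDl, if_pos hn] at hd
    have hm := PySem.Int.mod_lt n (b := 10) (by norm_num)
    cases hd
    omega
  · rw [pvDl, if_neg hn] at hd
    exact absurd hd (by simp)

theorem pv_eq (n : Int) : exists_pair n = exists_pair_alt n := by
  unfold exists_pair exists_pair_alt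
  rw [pv_collect_eq, List.nil_append, pv_loopA_eq]
  have hZ : pvZ ([none] ++ (pvDl n).map some ++ [none])
      = pvS (none :: (pvDl n).map some ++ [none]) := pv_zip_any_eq _
  have hA : pvLoopL (pvDl n) 10 1 = pvG (pvDl n) :=
    pv_loopA_G (pvDl n).length _ _ le_rfl (pv_head_pvDl_ne_ten n)
  have hB : pvS (none :: (pvDl n).map some ++ [none]) = pvG (pvDl n) := by
    apply pv_S_G (pvDl n).length _ _ le_rfl
    intro h t _
    simp
  rw [hA, ← hB, ← hZ]
  rfl

-- ===== VERDICT (by name: the statement is the Claim_ definition above) =====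
theorem exists_pair_spec : Claim_equal_exists_pair := by
  intro n _
  unfold Spec_exists_pair
  exact pv_eq n
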